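-- pv_equiv track=rewrite | github.com/simonwicky/adventofcode | 2015/11/11_2.py | last_req
-- ===== SOURCE A (Python) =====
-- def last_req(password):
--     first_double = ''
--     for i in range(len(password) - 1):
--         if password[i] == password[i + 1]:
--             if not first_double:
--                 first_double = password[i]
--             else:
--                 if password[i] != first_double:
--                     return True
--     return False
-- ===== SOURCE B (Python) =====
-- def last_req(password):
--     # For each distinct letter of the password, test whether its doubled pair
--     # occurs as a substring; two or more such letters means two distinct doubles.
--     return sum(c + c in password for c in set(password)) >= 2
-- ===== Notes on version B (the rewrite author's own statement) =====
-- stated objective: alternative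
-- what changed: Instead of scanning adjacent positions with a first-double sentinel and early return, B iterates over the distinct letters of the password and, for each, does a substring search for its doubled pair, then counts how many letters have one.
import Mathlib
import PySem

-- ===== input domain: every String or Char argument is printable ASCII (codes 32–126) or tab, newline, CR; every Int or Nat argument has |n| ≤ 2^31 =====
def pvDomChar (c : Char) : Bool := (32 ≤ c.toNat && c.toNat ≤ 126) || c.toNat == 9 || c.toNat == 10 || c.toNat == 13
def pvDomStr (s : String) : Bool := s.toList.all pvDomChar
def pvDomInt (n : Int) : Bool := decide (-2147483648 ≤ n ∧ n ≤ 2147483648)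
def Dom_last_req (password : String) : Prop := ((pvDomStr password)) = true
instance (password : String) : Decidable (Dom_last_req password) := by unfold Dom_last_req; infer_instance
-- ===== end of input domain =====

-- B replaces A's adjacent-position scan with a sentinel and early return by a
-- count, over the distinct letters of the password, of those whose doubled pair
-- occurs as a substring (objective: alternative).


-- ===== PORT A =====
-- A's loop over i in range(len-1), comparing password[i] with password[i+1],
-- transcribed as structural recursion over the adjacent pairs of the char list;
-- 'fd : Option Char' is the sentinel first_double ('' = none).
def lastReqLoopA (fd : Option Char) : List Char → Bool
  | c1 :: c2 :: rest =>
    if c1 = c2 then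
      match fd with
      | none => lastReqLoopA (some c1) (c2 :: rest)
      | some f => if c1 ≠ f then true else lastReqLoopA (some f) (c2 :: rest)
    else lastReqLoopA fd (c2 :: rest)
  | _ => false

def last_req (password : String) : Bool :=
  lastReqLoopA none password.toList

-- ===== PORT B =====
-- sum(c + c in password for c in set(password)) >= 2:
-- 'set(password)' is PySem.Set.ofList, 'c + c in password' is PySem.Chars.isIn [c, c],
-- and the sum of the booleans is the count of distinct letters passing the test.
def last_req_alt (password : String) : Bool :=
  decide (2 ≤ (PySem.Set.ofList password.toList).countP
      (fun c => PySem.Chars.isIn [c, c] password.toList))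

-- ===== PRECONDITION & SPEC =====
def Spec_last_req (password : String) (out : Bool) : Prop := out = last_req_alt password
instance (password : String) (out : Bool) : Decidable (Spec_last_req password out) := by unfold Spec_last_req; infer_instance

-- ===== CLAIM (what is proved, stated in full; the proofs are below) =====
def Claim_equal_last_req : Prop := ∀ (password : String), Dom_last_req password → Spec_last_req password (last_req password)

-- ===== LEMMAS AND PROOFS =====

-- the list of letters standing at a double position (proof-side helper)
def altDoubles : List Char → List Char
  | c1 :: c2 :: rest => (if c1 = c2 then [c1] else []) ++ altDoubles (c2 :: rest)
  | _ => []

theorem loopA_some (f : Char) (cs : List Char) :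
    lastReqLoopA (some f) cs = (altDoubles cs).any (· ≠ f) := by
  induction cs with
  | nil => simp [lastReqLoopA, altDoubles]
  | cons c1 rest ih =>
    cases rest with
    | nil => simp [lastReqLoopA, altDoubles]
    | cons c2 rest' =>
      by_cases h : c1 = c2
      · by_cases hf : c1 = f <;> simp [lastReqLoopA, altDoubles, h, hf, ih]
      · simp [lastReqLoopA, altDoubles, h, ih]

theorem loopA_none (cs : List Char) :
    lastReqLoopA none cs =
      (match altDoubles cs with
       | [] => false
       | f :: t => t.any (· ≠ f)) := by
  induction cs with
  | nil => simp [lastReqLoopA, altDoubles]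
  | cons c1 rest ih =>
    cases rest with
    | nil => simp [lastReqLoopA, altDoubles]
    | cons c2 rest' =>
      by_cases h : c1 = c2
      · simp [lastReqLoopA, altDoubles, h, loopA_some]
      · simp [lastReqLoopA, altDoubles, h, ih]

theorem mem_altDoubles_iff (c : Char) (cs : List Char) :
    c ∈ altDoubles cs ↔ [c, c] <:+: cs := by
  induction cs with
  | nil => simp [altDoubles]
  | cons c1 rest ih =>
    cases rest with
    | nil =>
      simp only [altDoubles]
      constructor
      · intro h; simp at h
      · intro h
        rcases h with ⟨s, t, hst⟩
        have := congrArg List.length hst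
        simp at this
        omega
    | cons c2 rest' =>
      simp only [altDoubles]
      constructor
      · intro h
        by_cases h12 : c1 = c2
        · simp [h12] at h
          rcases h with rfl | h
          · exact ⟨[], rest', by simp [h12]⟩
          · rcases (ih.mp h) with ⟨s, t, hst⟩
            exact ⟨c1 :: s, t, by simp [hst]⟩
        · simp [h12] at h
          rcases (ih.mp h) with ⟨s, t, hst⟩
          exact ⟨c1 :: s, t, by simp [hst]⟩
      · intro h
        rcases h with ⟨s, t, hst⟩
        cases s with
        | nil =>
          simp at hst
          obtain ⟨rfl, rfl, _⟩ := hst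
          simp
        | cons x s' =>
          simp at hst
          obtain ⟨rfl, hst⟩ := hst
          have : c ∈ altDoubles (c2 :: rest') := by
            apply ih.mpr
            exact ⟨s', t, by simpa using hst⟩
          simp [this]

theorem mem_of_mem_altDoubles {c : Char} {cs : List Char} (h : c ∈ altDoubles cs) :
    c ∈ cs := by
  rcases (mem_altDoubles_iff c cs).mp h with ⟨s, t, hst⟩
  subst hst; simp

theorem countP_eq_card (cs : List Char) :
    (PySem.Set.ofList cs).countP (fun c => PySem.Chars.isIn [c, c] cs)
      = (altDoubles cs).toFinset.card := by
  rw [List.countP_eq_length_filter]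
  have hnd : ((PySem.Set.ofList cs).filter
      (fun c => PySem.Chars.isIn [c, c] cs)).Nodup :=
    (PySem.Set.nodup_ofList (xs := cs)).filter _
  rw [← List.toFinset_card_of_nodup hnd]
  congr 1
  apply Finset.ext
  intro a
  simp only [List.mem_toFinset, List.mem_filter, PySem.Set.mem_ofList,
    PySem.Chars.isIn_iff_infix, ← mem_altDoubles_iff]
  constructor
  · exact fun h => h.2
  · exact fun h => ⟨mem_of_mem_altDoubles h, h⟩

theorem two_distinct_iff (L : List Char) :
    (match L with
     | [] => false
     | f :: t => t.any (· ≠ f)) =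
      decide (2 ≤ L.toFinset.card) := by
  cases L with
  | nil => simp [List.toFinset_nil]
  | cons f t =>
    rw [Bool.eq_iff_iff]
    simp only [List.any_eq_true, decide_eq_true_iff]
    constructor
    · rintro ⟨c, hc, hcf⟩
      have h2 : 1 < (f :: t).toFinset.card :=
        Finset.one_lt_card.mpr ⟨f, by simp, c, by simp [hc], Ne.symm hcf⟩
      omega
    · intro h2
      obtain ⟨a, ha, b, hb, hab⟩ := Finset.one_lt_card.mp (by omega : 1 < (f :: t).toFinset.card)
      simp [List.mem_toFinset] at ha hb
      rcases ha with rfl | ha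
      · rcases hb with rfl | hb
        · exact absurd rfl hab
        · exact ⟨b, hb, by simp [Ne.symm hab]⟩
      · by_cases haf : a = f
        · subst haf
          rcases hb with rfl | hb
          · exact absurd rfl hab
          · exact ⟨b, hb, by simp [Ne.symm hab]⟩
        · exact ⟨a, ha, by simp [haf]⟩

-- ===== VERDICT (by name: the statement is the Claim_ definition above) =====
theorem last_req_spec : Claim_equal_last_req := by
  intro password _
  unfold Spec_last_req last_req last_req_alt
  rw [loopA_none, two_distinct_iff, countP_eq_card]
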